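-- pv_equiv track=rewrite | github.com/thepian/record-thing | libs/record_thing/taxonomy/taxonomy_parser.py | lookupCodeByName
-- ===== SOURCE A (Python) =====
-- def lookupCodeByName(name, taxonomy_content):
--   lines = taxonomy_content.split('\n')
--   filtered_lines = lines[1:]
--   filtered_lines = list(filter(lambda line: len(line) > 0, filtered_lines))
--   for line in filtered_lines:
--     if(line.split('-', 1).pop().strip() == name):
--       return line.split('-', 1)[0].strip()
--   return None
-- ===== SOURCE B (Python) =====
-- def lookupCodeByName(name, taxonomy_content):
--     # Build a first-occurrence-wins table once, then look the name up.
--     table = {}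
--     for line in taxonomy_content.split('\n')[1:]:
--         if not line:
--             continue
--         parts = line.split('-', 1)
--         table.setdefault(parts[-1].strip(), parts[0].strip())
--     return table.get(name)
-- ===== Notes on version B (the rewrite author's own statement) =====
-- stated objective: idiomatic
-- what changed: Replaces A's filter-then-scan with early return by a single pass that builds a first-occurrence-wins dict via setdefault and finishes with one table.get(name) lookup.
import Mathlib
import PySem

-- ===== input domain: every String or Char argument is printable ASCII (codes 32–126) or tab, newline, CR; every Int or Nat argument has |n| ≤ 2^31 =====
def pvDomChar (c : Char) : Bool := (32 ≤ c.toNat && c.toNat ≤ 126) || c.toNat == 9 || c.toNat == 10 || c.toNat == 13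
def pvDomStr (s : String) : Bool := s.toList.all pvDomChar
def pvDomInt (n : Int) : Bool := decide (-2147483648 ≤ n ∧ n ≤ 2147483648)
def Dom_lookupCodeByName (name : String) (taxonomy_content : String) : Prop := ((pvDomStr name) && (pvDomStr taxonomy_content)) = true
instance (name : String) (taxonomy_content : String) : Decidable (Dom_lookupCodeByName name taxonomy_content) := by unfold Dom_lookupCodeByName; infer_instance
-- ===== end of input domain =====

-- B replaces A's early-return scan by a single setdefault-built first-wins table plus one lookup (objective: idiomatic).

-- shared by both ports: line.split('-', 1); the getD "" defaults are unreachable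
-- (split with a nonempty separator returns a nonempty list).
def pvParts (line : String) : List String := (PySem.Str.splitMax? line "-" 1).getD []
-- line.split('-',1).pop().strip() — pop() is called on a fresh list, only its return
-- value (the last element) is used, so it is ported as the [-1] element.
def pvKey (line : String) : String := PySem.Str.strip ((PySem.List.pyGet? (pvParts line) (-1)).getD "")
-- line.split('-',1)[0].strip()
def pvVal (line : String) : String := PySem.Str.strip ((PySem.List.pyGet? (pvParts line) 0).getD "")

-- ===== PORT A =====
def pvLoopA (name : String) : List String → Option String
  | [] => none
  | l :: ls => if pvKey l == name then some (pvVal l) else pvLoopA name ls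

def lookupCodeByName (name : String) (taxonomy_content : String) : Option String :=
  let lines := (PySem.Str.split? taxonomy_content "\n").getD []
  let filtered_lines := PySem.List.slice lines (some 1) none
  let filtered_lines := filtered_lines.filter (fun line => decide (0 < PySem.Str.len line))
  pvLoopA name filtered_lines

-- ===== PORT B =====
def pvStep (d : PySem.Dict String String) (line : String) : PySem.Dict String String :=
  if line == "" then d else d.setdefault (pvKey line) (pvVal line)

def lookupCodeByName_alt (name : String) (taxonomy_content : String) : Option String :=
  let lines := PySem.List.slice ((PySem.Str.split? taxonomy_content "\n").getD []) (some 1) none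
  let table := lines.foldl pvStep PySem.Dict.empty
  table.get? name

-- ===== PRECONDITION & SPEC =====
def Spec_lookupCodeByName (name : String) (taxonomy_content : String) (out : Option String) : Prop := out = lookupCodeByName_alt name taxonomy_content
instance (name : String) (taxonomy_content : String) (out : Option String) : Decidable (Spec_lookupCodeByName name taxonomy_content out) := by unfold Spec_lookupCodeByName; infer_instance

-- ===== CLAIM (what is proved, stated in full; the proofs are below) =====
def Claim_equal_lookupCodeByName : Prop := ∀ (name : String) (taxonomy_content : String), Dom_lookupCodeByName name taxonomy_content → Spec_lookupCodeByName name taxonomy_content (lookupCodeByName name taxonomy_content)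

-- ===== LEMMAS AND PROOFS =====

lemma pv_filter_cons_ne (l : String) (ls : List String) (h : ¬ l = "") :
    (l :: ls).filter (fun line => decide (0 < PySem.Str.len line)) =
      l :: ls.filter (fun line => decide (0 < PySem.Str.len line)) := by
  rw [List.filter_cons]
  simp [h]

lemma pv_filter_cons_eq (ls : List String) :
    ("" :: ls).filter (fun line => decide (0 < PySem.Str.len line)) =
      ls.filter (fun line => decide (0 < PySem.Str.len line)) := by
  rw [List.filter_cons]
  simp [PySem.Str.len]

lemma pv_fold_get (name : String) : ∀ (ls : List String) (d : PySem.Dict String String),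
    (ls.foldl pvStep d).get? name =
      (d.get? name).or (pvLoopA name (ls.filter (fun line => decide (0 < PySem.Str.len line)))) := by
  intro ls
  induction ls with
  | nil => intro d; simp [pvLoopA]
  | cons l ls ih =>
    intro d
    by_cases hl : l = ""
    · subst hl
      rw [List.foldl_cons, pv_filter_cons_eq]
      have : pvStep d "" = d := by simp [pvStep]
      rw [this, ih]
    · rw [List.foldl_cons, pv_filter_cons_ne l ls hl]
      have hstep : pvStep d l = d.setdefault (pvKey l) (pvVal l) := by simp [pvStep, hl]
      rw [hstep, ih]
      by_cases hk : pvKey l = name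
      · subst hk
        rw [PySem.Dict.get?_setdefault_self]
        cases hdg : d.get? (pvKey l) with
        | none => simp [pvLoopA]
        | some v => simp [pvLoopA]
      · rw [PySem.Dict.get?_setdefault_of_ne _ _ (fun e => hk e.symm)]
        simp [pvLoopA, hk]

-- ===== VERDICT (by name: the statement is the Claim_ definition above) =====
theorem lookupCodeByName_spec : Claim_equal_lookupCodeByName := by
  intro name c _
  unfold Spec_lookupCodeByName lookupCodeByName lookupCodeByName_alt
  rw [pv_fold_get]
  simp
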